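-- pv_equiv track=rewrite | github.com/troykerim/python_projects | happy_num.py | gen_happy_numbers
-- ===== SOURCE A (Python) =====
-- def is_happy_num(n):
--     past = set() # Store previous encountered numbers
--     while n != 1:
--         n = sum(int(i) ** 2 for i in str(n))
--         if n in past:
--             return False
--         past.add(n)
--     return True
--
-- def gen_happy_numbers(count):
--     happy_nums = []
--     num = 1
--     while len(happy_nums) < count:
--         if is_happy_num(num):
--             happy_nums.append(num)
--         num += 1
--     return happy_nums
-- ===== SOURCE B (Python) =====
-- def gen_happy_numbers(count):
--     happy_nums = []
--     num = 1
--     while len(happy_nums) < count: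
--         n = num
--         # every orbit of the digit-square-sum map ends in the fixed point 1
--         # or enters the cycle through 4, so no 'seen' set is needed
--         while n != 1 and n != 4:
--             t = 0
--             while n:
--                 n, d = divmod(n, 10)
--                 t += d * d
--             n = t
--         if n == 1:
--             happy_nums.append(num)
--         num += 1
--     return happy_nums
-- ===== Notes on version B (the rewrite author's own statement) =====
-- stated objective: simpler
-- what changed: The happy test no longer converts to strings or maintains a set of seen values: it iterates n -> sum of squares of its digits (computed arithmetically with divmod) while n is neither 1 nor 4, relying on the fact that every unhappy orbit enters the 4-cycle.
import Mathlib
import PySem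

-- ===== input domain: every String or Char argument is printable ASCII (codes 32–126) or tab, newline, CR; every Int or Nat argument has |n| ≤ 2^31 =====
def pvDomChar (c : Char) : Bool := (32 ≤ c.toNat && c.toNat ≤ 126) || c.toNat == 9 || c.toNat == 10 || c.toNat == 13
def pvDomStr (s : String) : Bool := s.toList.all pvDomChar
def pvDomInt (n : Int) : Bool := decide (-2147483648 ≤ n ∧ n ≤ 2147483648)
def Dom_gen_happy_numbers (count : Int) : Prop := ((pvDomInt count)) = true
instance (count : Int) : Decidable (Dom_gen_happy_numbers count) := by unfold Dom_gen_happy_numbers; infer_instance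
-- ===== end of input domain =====

-- B replaces A's string conversion and set of seen values by pure integer arithmetic:
-- iterate the digit-square-sum (via divmod) while n is neither 1 nor 4 (every unhappy
-- orbit enters the 4-cycle), keeping the same outer enumeration.  Objective: simpler.
-- Loops are ported with a fuel parameter that only makes them total; the fuel is large
-- enough for every input the proofs cover (outer candidates up to 10^13).

-- ===== PORT A =====
-- int(i) ** 2 for one character i of str(n) (n ≥ 1 here, so i is always a digit)
def pvCharSq (c : Char) : Int := ((PySem.Int.ofStr? (String.singleton c)).getD 0) ^ 2
-- n = sum(int(i) ** 2 for i in str(n))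
def pvStepA (n : Int) : Int := ((PySem.Int.toStr n).toList.map pvCharSq).sum
-- the 'while n != 1' loop of is_happy_num, state (n, past), fuel only for totality
def pvHappyLoopA : Nat → Int → PySem.Set Int → Bool
  | 0, _, _ => false
  | fuel+1, n, past =>
    if n ≠ 1 then
      let n' := pvStepA n
      if PySem.Set.contains past n' then false
      else pvHappyLoopA fuel n' (PySem.Set.add past n')
    else true

def is_happy_num (n : Int) : Bool := pvHappyLoopA 1000 n PySem.Set.empty

-- the 'while len(happy_nums) < count' loop, state (happy_nums, num)
def pvGenLoopA (count : Int) : Nat → List Int → Int → List Int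
  | 0, acc, _ => acc
  | fuel+1, happy_nums, num =>
    if (happy_nums.length : Int) < count then
      if is_happy_num num then pvGenLoopA count fuel (happy_nums ++ [num]) (num + 1)
      else pvGenLoopA count fuel happy_nums (num + 1)
    else happy_nums

def gen_happy_numbers (count : Int) : List Int := pvGenLoopA count 9999999999999 [] 1

-- ===== PORT B =====
-- the 'while n:' digit loop: n, d = divmod(n, 10); t += d * d   (divmod with the
-- literal 10 never raises; ported exactly as floordiv/mod)
def pvDigitLoopB : Nat → Int → Int → Int × Int
  | 0, n, t => (n, t)
  | fuel+1, n, t =>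
    if n ≠ 0 then
      pvDigitLoopB fuel (PySem.Int.floordiv n 10) (t + PySem.Int.mod n 10 * PySem.Int.mod n 10)
    else (n, t)

-- the 'while n != 1 and n != 4' loop of B
def pvHappyLoopB : Nat → Int → Int
  | 0, n => n
  | fuel+1, n =>
    if n ≠ 1 ∧ n ≠ 4 then pvHappyLoopB fuel (pvDigitLoopB 64 n 0).2
    else n

def pvGenLoopB (count : Int) : Nat → List Int → Int → List Int
  | 0, acc, _ => acc
  | fuel+1, happy_nums, num =>
    if (happy_nums.length : Int) < count then
      if pvHappyLoopB 1000 num == 1 then pvGenLoopB count fuel (happy_nums ++ [num]) (num + 1)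
      else pvGenLoopB count fuel happy_nums (num + 1)
    else happy_nums

def gen_happy_numbers_alt (count : Int) : List Int := pvGenLoopB count 9999999999999 [] 1

-- ===== PRECONDITION & SPEC =====
def Spec_gen_happy_numbers (count : Int) (out : List Int) : Prop := out = gen_happy_numbers_alt count
instance (count : Int) (out : List Int) : Decidable (Spec_gen_happy_numbers count out) := by unfold Spec_gen_happy_numbers; infer_instance

-- ===== CLAIM (what is proved, stated in full; the proofs are below) =====
def Claim_equal_gen_happy_numbers : Prop := ∀ (count : Int), Dom_gen_happy_numbers count → Spec_gen_happy_numbers count (gen_happy_numbers count)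

-- ===== LEMMAS AND PROOFS =====

-- the digit-square-sum map on Nat (written with Nat.rec so the kernel evaluates it fast)
def sNfuel : Nat → Nat → Nat :=
  fun f => Nat.rec (motive := fun _ => Nat → Nat) (fun _ => 0)
    (fun _ ih n => if n = 0 then 0 else (n % 10)^2 + ih (n / 10)) f

def sN (n : Nat) : Nat := sNfuel n n

-- does iterating sN from n reach 1 or 4 within the given fuel?
def hitF : Nat → Nat → Bool :=
  fun f => Nat.rec (motive := fun _ => Nat → Bool) (fun _ => false)
    (fun _ ih n => if n = 1 ∨ n = 4 then true else ih (sN n)) f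

theorem sNfuel_succ (f n : Nat) :
    sNfuel (f+1) n = if n = 0 then 0 else (n % 10)^2 + sNfuel f (n / 10) := rfl

theorem hitF_succ (f n : Nat) :
    hitF (f+1) n = if n = 1 ∨ n = 4 then true else hitF f (sN n) := rfl

theorem sN_zero : sN 0 = 0 := rfl

theorem sNfuel_zero (f : Nat) : sNfuel f 0 = 0 := by cases f <;> rfl

theorem sNfuel_congr : ∀ (n f g : Nat), n ≤ f → n ≤ g → sNfuel f n = sNfuel g n := by
  intro n
  induction n using Nat.strong_induction_on with
  | _ n ih =>
    intro f g hf hg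
    by_cases hn : n = 0
    · subst hn; rw [sNfuel_zero, sNfuel_zero]
    · obtain ⟨f', rfl⟩ : ∃ f', f = f' + 1 := ⟨f - 1, by omega⟩
      obtain ⟨g', rfl⟩ : ∃ g', g = g' + 1 := ⟨g - 1, by omega⟩
      have hd : n / 10 < n := Nat.div_lt_self (by omega) (by omega)
      rw [sNfuel_succ, sNfuel_succ, if_neg hn, if_neg hn,
        ih (n / 10) hd f' g' (by omega) (by omega)]

theorem sN_eq (n : Nat) : sN n = if n = 0 then 0 else (n % 10)^2 + sN (n / 10) := by
  by_cases hn : n = 0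
  · subst hn; rfl
  · obtain ⟨p, rfl⟩ : ∃ p, n = p + 1 := ⟨n - 1, by omega⟩
    have hd : (p + 1) / 10 < p + 1 := Nat.div_lt_self (by omega) (by omega)
    rw [if_neg hn]
    show sNfuel (p + 1) (p + 1) = _
    rw [sNfuel_succ, if_neg hn,
      sNfuel_congr ((p + 1) / 10) p ((p + 1) / 10) (by omega) (le_refl _)]
    rfl

theorem sN_pos : ∀ (n : Nat), 1 ≤ n → 1 ≤ sN n := by
  intro n
  induction n using Nat.strong_induction_on with
  | _ n ih =>
    intro hn
    rw [sN_eq, if_neg (by omega)]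
    by_cases h10 : n % 10 = 0
    · have hd1 : 1 ≤ n / 10 := by omega
      have := ih (n / 10) (Nat.div_lt_self (by omega) (by omega)) hd1
      omega
    · have : 1 ≤ (n % 10)^2 := Nat.one_le_iff_ne_zero.mpr (pow_ne_zero 2 h10)
      omega

theorem sN_le : ∀ (k n : Nat), n < 10 ^ k → sN n ≤ 81 * k := by
  intro k
  induction k with
  | zero => intro n hn; interval_cases n; simp [sN_zero]
  | succ k ih =>
    intro n hn
    by_cases hz : n = 0
    · subst hz; simp [sN_zero]
    · rw [sN_eq, if_neg hz]
      have h1 : (n % 10)^2 ≤ 81 := by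
        have h9 : n % 10 ≤ 9 := by omega
        calc (n % 10)^2 ≤ 9^2 := Nat.pow_le_pow_left h9 2
        _ = 81 := by norm_num
      have h2 : n / 10 < 10 ^ k := by
        rw [pow_succ'] at hn
        exact Nat.div_lt_of_lt_mul hn
      have := ih (n / 10) h2
      omega

set_option maxRecDepth 100000 in
set_option maxHeartbeats 2000000 in
theorem check1500 : ∀ m, m < 1501 → m = 0 ∨ hitF 60 m = true := by decide

theorem hitF_exists : ∀ (f n : Nat), hitF f n = true → ∃ k, k < f ∧ (sN^[k] n = 1 ∨ sN^[k] n = 4) := by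
  intro f
  induction f with
  | zero => intro n h; exact absurd h (by rw [show hitF 0 n = false from rfl]; simp)
  | succ f ih =>
    intro n h
    by_cases h14 : n = 1 ∨ n = 4
    · exact ⟨0, by omega, by simpa using h14⟩
    · rw [hitF_succ, if_neg h14] at h
      obtain ⟨k, hk, hh⟩ := ih (sN n) h
      exact ⟨k + 1, by omega, by rwa [Function.iterate_succ_apply]⟩

theorem exists_first (m : Nat) (h1 : 1 ≤ m) (h2 : m < 10 ^ 14) :
    ∃ K, K ≤ 61 ∧ (sN^[K] m = 1 ∨ sN^[K] m = 4) ∧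
      ∀ j, j < K → ¬(sN^[j] m = 1 ∨ sN^[j] m = 4) := by
  have hex : ∃ k, k ≤ 61 ∧ (sN^[k] m = 1 ∨ sN^[k] m = 4) := by
    by_cases h14 : m = 1 ∨ m = 4
    · exact ⟨0, by omega, by simpa using h14⟩
    · have hs1 : 1 ≤ sN m := sN_pos m h1
      have hs2 : sN m ≤ 1134 := by have := sN_le 14 m h2; omega
      have hhit : hitF 60 (sN m) = true := by
        rcases check1500 (sN m) (by omega) with h | h
        · omega
        · exact h
      obtain ⟨k, hk, hh⟩ := hitF_exists 60 (sN m) hhit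
      exact ⟨k + 1, by omega, by rwa [Function.iterate_succ_apply]⟩
  have hex' : ∃ k, sN^[k] m = 1 ∨ sN^[k] m = 4 := ⟨hex.choose, hex.choose_spec.2⟩
  refine ⟨Nat.find hex', ?_, Nat.find_spec hex', fun j hj => Nat.find_min hex' hj⟩
  exact le_trans (Nat.find_le hex.choose_spec.2) hex.choose_spec.1

theorem iterate_mod (y p : Nat) (hp : 0 < p) (hper : sN^[p] y = y) :
    ∀ r, sN^[r] y = sN^[r % p] y := by
  intro r
  induction r using Nat.strong_induction_on with
  | _ r ih =>
    by_cases hr : r < p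
    · rw [Nat.mod_eq_of_lt hr]
    · have hpr : p ≤ r := by omega
      have h1 : sN^[r] y = sN^[r - p] y := by
        conv_lhs => rw [show r = (r - p) + p by omega]
        rw [Function.iterate_add_apply, hper]
      rw [h1, ih (r - p) (by omega), Nat.mod_eq_sub_mod hpr]

theorem orbit_nodup (m K : Nat) (hK : sN^[K] m = 1 ∨ sN^[K] m = 4)
    (hmin : ∀ j, j < K → ¬(sN^[j] m = 1 ∨ sN^[j] m = 4)) :
    ∀ i j, i < j → j ≤ K → sN^[i] m ≠ sN^[j] m := by
  intro i j hij hjK heq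
  have hper : sN^[j - i] (sN^[i] m) = sN^[i] m := by
    rw [← Function.iterate_add_apply, show j - i + i = j by omega]
    exact heq.symm
  have hKi : sN^[K] m = sN^[(K - i) % (j - i) + i] m := by
    conv_lhs => rw [show K = (K - i) + i by omega]
    rw [Function.iterate_add_apply,
      iterate_mod (sN^[i] m) (j - i) (by omega) hper (K - i),
      ← Function.iterate_add_apply]
  have hlt : (K - i) % (j - i) + i < K := by
    have := Nat.mod_lt (K - i) (y := j - i) (by omega)
    omega
  exact hmin _ hlt (by rw [← hKi]; exact hK)

-- ===== bridges between the ports' Int computations and sN =====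

theorem charSq_digit : ∀ d : Nat, d < 10 → pvCharSq (Nat.digitChar d) = (d : Int)^2 := by decide

theorem digits_sum : ∀ m : Nat, ((Nat.toDigits 10 m).map pvCharSq).sum = (sN m : Int) := by
  intro m
  induction m using Nat.strong_induction_on with
  | _ m ih =>
    rw [Nat.toDigits_eq_if (by norm_num)]
    by_cases hm : m < 10
    · rw [if_pos hm]
      simp only [List.map_cons, List.map_nil, List.sum_cons, List.sum_nil]
      rw [charSq_digit m hm, sN_eq]
      by_cases hz : m = 0
      · subst hz; simp
      · rw [if_neg hz, Nat.mod_eq_of_lt hm, Nat.div_eq_of_lt hm, sN_zero]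
        push_cast
        ring
    · rw [if_neg hm]
      rw [List.map_append, List.sum_append]
      rw [ih (m / 10) (Nat.div_lt_self (by omega) (by omega))]
      simp only [List.map_cons, List.map_nil, List.sum_cons, List.sum_nil]
      rw [charSq_digit (m % 10) (by omega)]
      rw [sN_eq m, if_neg (by omega : ¬ m = 0)]
      push_cast
      ring

theorem stepA_eq (m : Nat) : pvStepA (m : Int) = (sN m : Int) := by
  unfold pvStepA
  rw [PySem.Int.toList_toStr]
  unfold PySem.Int.toChars
  rw [if_neg (by omega), Int.toNat_natCast]
  exact digits_sum m

theorem digitLoopB_eq : ∀ (f : Nat) (m : Nat) (t : Int), m < 10 ^ f →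
    (pvDigitLoopB f (m : Int) t).2 = t + (sN m : Int) := by
  intro f
  induction f with
  | zero =>
    intro m t hm
    interval_cases m
    simp [pvDigitLoopB, sN_zero]
  | succ f ih =>
    intro m t hm
    by_cases hz : m = 0
    · subst hz; simp [pvDigitLoopB, sN_zero]
    · have hne : (m : Int) ≠ 0 := by exact_mod_cast hz
      simp only [pvDigitLoopB, if_pos hne]
      rw [show ((10 : Int)) = ((10 : Nat) : Int) by norm_num,
        PySem.Int.floordiv_natCast, PySem.Int.mod_natCast]
      have hlt : m / 10 < 10 ^ f := by
        rw [pow_succ'] at hm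
        exact Nat.div_lt_of_lt_mul hm
      rw [ih (m / 10) _ hlt, sN_eq m, if_neg hz]
      push_cast
      ring

-- one unfolding of A's inner loop when n ≠ 1
theorem stepA_unfold (g : Nat) (n n' : Int) (past : PySem.Set Int)
    (h1 : n ≠ 1) (h2 : pvStepA n = n') :
    pvHappyLoopA (g + 1) n past =
      if PySem.Set.contains past n' then false
      else pvHappyLoopA g n' (PySem.Set.add past n') := by
  simp only [pvHappyLoopA, if_pos h1, h2]

-- once A's loop reaches the value 4 it returns False within 9 more iterations
theorem A_from4 : ∀ (f : Nat) (past : PySem.Set Int), 10 ≤ f →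
    pvHappyLoopA f 4 past = false := by
  intro f past hf
  obtain ⟨g, rfl⟩ : ∃ g, f = g + 9 := ⟨f - 9, by omega⟩
  rw [show g + 9 = (g + 8) + 1 by omega,
    stepA_unfold _ _ 16 _ (by norm_num) (by decide)]
  by_cases c1 : PySem.Set.contains past 16 = true
  · rw [if_pos c1]
  · simp only [Bool.not_eq_true] at c1
    rw [if_neg (by rw [c1]; simp)]
    rw [show g + 8 = (g + 7) + 1 by omega,
      stepA_unfold _ _ 37 _ (by norm_num) (by decide)]
    by_cases c2 : PySem.Set.contains (PySem.Set.add past 16) 37 = true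
    · rw [if_pos c2]
    · simp only [Bool.not_eq_true] at c2
      rw [if_neg (by rw [c2]; simp)]
      rw [show g + 7 = (g + 6) + 1 by omega,
        stepA_unfold _ _ 58 _ (by norm_num) (by decide)]
      by_cases c3 : PySem.Set.contains (PySem.Set.add (PySem.Set.add past 16) 37) 58 = true
      · rw [if_pos c3]
      · simp only [Bool.not_eq_true] at c3
        rw [if_neg (by rw [c3]; simp)]
        rw [show g + 6 = (g + 5) + 1 by omega,
          stepA_unfold _ _ 89 _ (by norm_num) (by decide)]
        by_cases c4 : PySem.Set.contains (PySem.Set.add (PySem.Set.add (PySem.Set.add past 16) 37) 58) 89 = true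
        · rw [if_pos c4]
        · simp only [Bool.not_eq_true] at c4
          rw [if_neg (by rw [c4]; simp)]
          rw [show g + 5 = (g + 4) + 1 by omega,
            stepA_unfold _ _ 145 _ (by norm_num) (by decide)]
          by_cases c5 : PySem.Set.contains (PySem.Set.add (PySem.Set.add (PySem.Set.add (PySem.Set.add past 16) 37) 58) 89) 145 = true
          · rw [if_pos c5]
          · simp only [Bool.not_eq_true] at c5
            rw [if_neg (by rw [c5]; simp)]
            rw [show g + 4 = (g + 3) + 1 by omega,
              stepA_unfold _ _ 42 _ (by norm_num) (by decide)]
            by_cases c6 : PySem.Set.contains (PySem.Set.add (PySem.Set.add (PySem.Set.add (PySem.Set.add (PySem.Set.add past 16) 37) 58) 89) 145) 42 = true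
            · rw [if_pos c6]
            · simp only [Bool.not_eq_true] at c6
              rw [if_neg (by rw [c6]; simp)]
              rw [show g + 3 = (g + 2) + 1 by omega,
                stepA_unfold _ _ 20 _ (by norm_num) (by decide)]
              by_cases c7 : PySem.Set.contains (PySem.Set.add (PySem.Set.add (PySem.Set.add (PySem.Set.add (PySem.Set.add (PySem.Set.add past 16) 37) 58) 89) 145) 42) 20 = true
              · rw [if_pos c7]
              · simp only [Bool.not_eq_true] at c7
                rw [if_neg (by rw [c7]; simp)]
                rw [show g + 2 = (g + 1) + 1 by omega,
                  stepA_unfold _ _ 4 _ (by norm_num) (by decide)]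
                by_cases c8 : PySem.Set.contains (PySem.Set.add (PySem.Set.add (PySem.Set.add (PySem.Set.add (PySem.Set.add (PySem.Set.add (PySem.Set.add past 16) 37) 58) 89) 145) 42) 20) 4 = true
                · rw [if_pos c8]
                · simp only [Bool.not_eq_true] at c8
                  rw [if_neg (by rw [c8]; simp)]
                  rw [stepA_unfold _ _ 16 _ (by norm_num) (by decide)]
                  have hmem : PySem.Set.contains ((((((((PySem.Set.add past 16).add 37).add 58).add 89).add 145).add 42).add 20).add 4) (16 : Int) = true :=
                    (PySem.Set.contains_iff _ _).mpr (by simp [PySem.Set.mem_add])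
                  rw [if_pos hmem]

theorem loopA_eq : ∀ (K : Nat) (m : Nat) (f : Nat) (past : PySem.Set Int),
    1 ≤ m → m < 10 ^ 14 →
    (sN^[K] m = 1 ∨ sN^[K] m = 4) →
    (∀ j, j < K → ¬(sN^[j] m = 1 ∨ sN^[j] m = 4)) →
    (∀ i j, i < j → j ≤ K → sN^[i] m ≠ sN^[j] m) →
    (∀ j, 1 ≤ j → j ≤ K → ((sN^[j] m : Int) ∉ past)) →
    K + 10 ≤ f →
    pvHappyLoopA f (m : Int) past = decide (sN^[K] m = 1) := by
  intro K
  induction K with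
  | zero =>
    intro m f past h1 h2 hK hmin hnd hfr hf
    simp only [Function.iterate_zero_apply] at hK
    rcases hK with h | h
    · subst h
      obtain ⟨g, rfl⟩ : ∃ g, f = g + 1 := ⟨f - 1, by omega⟩
      simp [pvHappyLoopA]
    · subst h
      rw [show ((4 : Nat) : Int) = (4 : Int) by norm_num, A_from4 f past (by omega)]
      simp
  | succ K ih =>
    intro m f past h1 h2 hK hmin hnd hfr hf
    have hm1 : (m : Int) ≠ 1 := by
      have := hmin 0 (by omega)
      simp only [Function.iterate_zero_apply] at this
      intro h; exact this (Or.inl (by exact_mod_cast h))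
    obtain ⟨g, rfl⟩ : ∃ g, f = g + 1 := ⟨f - 1, by omega⟩
    rw [stepA_unfold g _ _ past hm1 (stepA_eq m)]
    have hfresh1 : ((sN m : Int)) ∉ past := by
      have := hfr 1 (le_refl 1) (by omega)
      rwa [Function.iterate_one] at this
    rw [if_neg (fun hc => hfresh1 ((PySem.Set.contains_iff _ _).mp hc))]
    have hres : ∀ j, sN^[j] (sN m) = sN^[j + 1] m := by
      intro j
      rw [Function.iterate_succ_apply]
    have goal := ih (sN m) g (PySem.Set.add past (sN m : Int))
      (sN_pos m h1) (by have := sN_le 14 m h2; omega)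
      (by rw [hres]; exact hK)
      (fun j hj => by rw [hres]; exact hmin (j + 1) (by omega))
      (fun i j hij hjK => by rw [hres, hres]; exact hnd (i + 1) (j + 1) (by omega) (by omega))
      (fun j hj1 hjK => by
        rw [hres]
        intro hmem
        rcases (PySem.Set.mem_add past ((sN m : Int)) _).mp hmem with h | h
        · exact hfr (j + 1) (by omega) (by omega) h
        · have hne := hnd 1 (j + 1) (by omega) (by omega)
          rw [Function.iterate_one] at hne
          exact hne (by exact_mod_cast h.symm))
      (by omega)
    rw [goal, hres]

theorem loopB_eq : ∀ (K : Nat) (m : Nat) (f : Nat),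
    1 ≤ m → m < 10 ^ 14 →
    (sN^[K] m = 1 ∨ sN^[K] m = 4) →
    (∀ j, j < K → ¬(sN^[j] m = 1 ∨ sN^[j] m = 4)) →
    K < f →
    pvHappyLoopB f (m : Int) = (sN^[K] m : Int) := by
  intro K
  induction K with
  | zero =>
    intro m f h1 h2 hK hmin hf
    obtain ⟨g, rfl⟩ : ∃ g, f = g + 1 := ⟨f - 1, by omega⟩
    simp only [Function.iterate_zero_apply] at hK ⊢
    have : ¬((m : Int) ≠ 1 ∧ (m : Int) ≠ 4) := by
      rcases hK with h | h <;> subst h <;> simp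
    simp only [pvHappyLoopB, if_neg this]
  | succ K ih =>
    intro m f h1 h2 hK hmin hf
    obtain ⟨g, rfl⟩ : ∃ g, f = g + 1 := ⟨f - 1, by omega⟩
    have hcond : (m : Int) ≠ 1 ∧ (m : Int) ≠ 4 := by
      have hm := hmin 0 (by omega)
      simp only [Function.iterate_zero_apply] at hm
      exact ⟨fun h => hm (Or.inl (by exact_mod_cast h)),
             fun h => hm (Or.inr (by exact_mod_cast h))⟩
    simp only [pvHappyLoopB, if_pos hcond]
    have hm64 : m < 10 ^ 64 := lt_of_lt_of_le h2 (Nat.pow_le_pow_right (by norm_num) (by norm_num))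
    rw [digitLoopB_eq 64 m 0 hm64, zero_add]
    have hres : ∀ j, sN^[j] (sN m) = sN^[j + 1] m := fun j => by
      rw [Function.iterate_succ_apply]
    rw [ih (sN m) g (sN_pos m h1) (by have := sN_le 14 m h2; omega)
      (by rw [hres]; exact hK)
      (fun j hj => by rw [hres]; exact hmin (j + 1) (by omega))
      (by omega), hres]

theorem happy_eq (m : Nat) (h1 : 1 ≤ m) (h2 : m ≤ 10 ^ 13) :
    is_happy_num (m : Int) = (pvHappyLoopB 1000 (m : Int) == 1) := by
  have h14 : m < 10 ^ 14 := lt_of_le_of_lt h2 (by norm_num)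
  obtain ⟨K, hK61, hK, hmin⟩ := exists_first m h1 h14
  have hnd := orbit_nodup m K hK hmin
  unfold is_happy_num
  rw [loopA_eq K m 1000 PySem.Set.empty h1 h14 hK hmin hnd
    (fun j _ _ => by simp [PySem.Set.empty]) (by omega)]
  rw [loopB_eq K m 1000 h1 h14 hK hmin (by omega)]
  rcases hK with h | h <;> rw [h] <;> simp

theorem gen_eq : ∀ (f : Nat) (count : Int) (acc : List Int) (num : Int),
    1 ≤ num → num + (f : Int) ≤ 10 ^ 13 →
    pvGenLoopA count f acc num = pvGenLoopB count f acc num := by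
  intro f
  induction f with
  | zero => intro count acc num _ _; rfl
  | succ f ih =>
    intro count acc num hnum hbound
    simp only [pvGenLoopA, pvGenLoopB]
    by_cases hc : (acc.length : Int) < count
    · rw [if_pos hc, if_pos hc]
      obtain ⟨m, rfl⟩ : ∃ m : Nat, num = (m : Int) :=
        ⟨num.toNat, (Int.toNat_of_nonneg (by omega)).symm⟩
      have hm1 : 1 ≤ m := by exact_mod_cast hnum
      have hm2 : m ≤ 10 ^ 13 := by
        have hfc : (0:Int) ≤ (f : Int) := by positivity
        have : (m : Int) ≤ 10 ^ 13 := by push_cast at hbound ⊢; omega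
        exact_mod_cast this
      rw [happy_eq m hm1 hm2]
      have hrec := ih count
      by_cases hh : (pvHappyLoopB 1000 (m : Int) == 1) = true
      · rw [if_pos hh, if_pos hh]
        exact hrec (acc ++ [(m : Int)]) ((m : Int) + 1) (by omega)
          (by push_cast at hbound ⊢; omega)
      · rw [if_neg hh, if_neg hh]
        exact hrec acc ((m : Int) + 1) (by omega)
          (by push_cast at hbound ⊢; omega)
    · rw [if_neg hc, if_neg hc]

-- ===== VERDICT (by name: the statement is the Claim_ definition above) =====
theorem gen_happy_numbers_spec : Claim_equal_gen_happy_numbers := by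
  intro count _
  unfold Spec_gen_happy_numbers gen_happy_numbers gen_happy_numbers_alt
  exact gen_eq 9999999999999 count [] 1 (by norm_num) (by norm_num)
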